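-- pv_equiv track=rewrite | github.com/shahrooz1997/LEGOstore | source/ABD_Client.py | is_all_timestamps_the_same
-- ===== SOURCE A (Python) =====
-- def is_all_timestamps_the_same(values, qourum_size):
--     count = 0
--     temp_time = None
--     for data in values:
--         if data[0] != "OK":
--             continue
--         if temp_time == None:
--             count += 1
--             temp_time = data[2]
--         elif temp_time != data[2]:
--             continue
--         else:
--             count += 1
--     assert(temp_time is not None)
--     if count < qourum_size:
--         return False
--     return True
-- ===== SOURCE B (Python) =====
-- def is_all_timestamps_the_same(values, qourum_size):
--     counts = {}
--     for data in values:
--         if data[0] == "OK":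
--             counts[data[2]] = counts.get(data[2], 0) + 1
--     assert counts
--     first_ts = next(iter(counts))
--     return counts[first_ts] >= qourum_size
-- ===== Notes on version B (the rewrite author's own statement) =====
-- stated objective: alternative
-- what changed: Replaces A's stateful count/temp_time scan with a histogram: one pass builds an insertion-ordered dict from OK-entry timestamp to its multiplicity, then the answer is read off as the count stored under the first inserted key.
import Mathlib
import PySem

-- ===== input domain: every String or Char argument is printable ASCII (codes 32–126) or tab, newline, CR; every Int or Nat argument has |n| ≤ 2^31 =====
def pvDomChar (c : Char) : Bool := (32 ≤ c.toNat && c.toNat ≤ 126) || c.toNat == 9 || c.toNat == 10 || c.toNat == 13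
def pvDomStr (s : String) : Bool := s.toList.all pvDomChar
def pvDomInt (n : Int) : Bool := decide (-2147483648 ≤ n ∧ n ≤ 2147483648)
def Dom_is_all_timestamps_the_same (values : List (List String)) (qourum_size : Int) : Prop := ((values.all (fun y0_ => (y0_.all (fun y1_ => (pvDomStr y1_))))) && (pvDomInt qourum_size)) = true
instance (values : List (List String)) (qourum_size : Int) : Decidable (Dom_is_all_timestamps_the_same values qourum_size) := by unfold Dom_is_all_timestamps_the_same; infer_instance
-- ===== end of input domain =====

-- B replaces A's stateful count/temp_time scan by a histogram dict (timestamp -> count of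
-- OK entries), reading the answer under the first inserted key (objective: alternative).


-- ===== PORT A =====
-- A's loop body on state (count, temp_time); data[0]/data[2] via PySem.List.pyGet?
-- (.getD "" is unreachable under Pre_, where the index is in range).
def pvStepA (st : Int × Option String) (data : List String) : Int × Option String :=
  if (PySem.List.pyGet? data 0).getD "" ≠ "OK" then st
  else match st.2 with
    | none => (st.1 + 1, PySem.List.pyGet? data 2)
    | some t => if some t ≠ PySem.List.pyGet? data 2 then st else (st.1 + 1, st.2)

def is_all_timestamps_the_same (values : List (List String)) (qourum_size : Int) : Bool :=
  let st := values.foldl pvStepA ((0 : Int), (none : Option String))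
  if st.1 < qourum_size then false else true

-- ===== PORT B =====
-- B's loop body: counts[data[2]] = counts.get(data[2], 0) + 1 for OK entries.
def pvStepB (d : PySem.Dict String Int) (data : List String) : PySem.Dict String Int :=
  if (PySem.List.pyGet? data 0).getD "" == "OK" then
    let ts := (PySem.List.pyGet? data 2).getD ""
    d.insert ts (d.getD ts 0 + 1)
  else d

def is_all_timestamps_the_same_alt (values : List (List String)) (qourum_size : Int) : Bool :=
  let counts := values.foldl pvStepB PySem.Dict.empty
  match counts.items with
  | [] => false   -- unreachable under Pre_ (B's Python raises AssertionError here)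
  | (_, c) :: _ => decide (qourum_size ≤ c)

-- ===== PRECONDITION & SPEC =====
-- Pre_ excludes exactly the inputs where the Python A raises: an empty inner list or an
-- "OK" entry shorter than 3 (IndexError), and no "OK" entry at all (AssertionError).
def Pre_is_all_timestamps_the_same (values : List (List String)) (qourum_size : Int) : Prop :=
  (∃ d ∈ values, d.headD "" = "OK") ∧
  ∀ d ∈ values, d ≠ [] ∧ (d.headD "" = "OK" → 3 ≤ d.length)
instance (values : List (List String)) (qourum_size : Int) : Decidable (Pre_is_all_timestamps_the_same values qourum_size) := by unfold Pre_is_all_timestamps_the_same; infer_instance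
def pvWitness_is_all_timestamps_the_same : List (List String) × Int := ([["OK", "x", "t1"]], 1)

def Spec_is_all_timestamps_the_same (values : List (List String)) (qourum_size : Int) (out : Bool) : Prop := out = is_all_timestamps_the_same_alt values qourum_size
instance (values : List (List String)) (qourum_size : Int) (out : Bool) : Decidable (Spec_is_all_timestamps_the_same values qourum_size out) := by unfold Spec_is_all_timestamps_the_same; infer_instance

-- ===== CLAIM (what is proved, stated in full; the proofs are below) =====
def Claim_equal_is_all_timestamps_the_same : Prop := ∀ (values : List (List String)) (qourum_size : Int), Dom_is_all_timestamps_the_same values qourum_size → Pre_is_all_timestamps_the_same values qourum_size → Spec_is_all_timestamps_the_same values qourum_size (is_all_timestamps_the_same values qourum_size)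

-- ===== LEMMAS AND PROOFS =====
lemma pvGet2_cons (a b c : String) (r : List String) :
    PySem.List.pyGet? (a::b::c::r) 2 = some c := by
  simp [PySem.List.pyGet?, PySem.List.pyIdx?]
  rw [if_pos (by omega)]
  simp

-- The matching predicate: an OK entry whose timestamp equals t.
def pvMatch (t : String) (d : List String) : Bool :=
  ((PySem.List.pyGet? d 0).getD "" == "OK") && ((PySem.List.pyGet? d 2).getD "" == t)

-- A's loop after the first OK entry has fixed temp_time = t: it adds to count exactly
-- the number of OK entries whose timestamp equals t.
lemma pvLoopA_some (l : List (List String)) (c : Int) (t : String)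
    (h : ∀ d ∈ l, d ≠ [] ∧ (d.headD "" = "OK" → 3 ≤ d.length)) :
    l.foldl pvStepA (c, some t) = (c + (l.countP (pvMatch t) : Int), some t) := by
  induction l generalizing c with
  | nil => simp
  | cons d l ih =>
    obtain ⟨hne, hlen⟩ := h d (by simp)
    have hrest : ∀ d' ∈ l, d' ≠ [] ∧ (d'.headD "" = "OK" → 3 ≤ d'.length) :=
      fun d' hd' => h d' (by simp [hd'])
    obtain ⟨a, r0, rfl⟩ := List.exists_cons_of_ne_nil hne
    by_cases hok : a = "OK"
    · subst hok
      have h3 : 3 ≤ ("OK" :: r0).length := hlen (by simp)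
      match r0, h3 with
      | b :: c2 :: r, _ =>
        by_cases hts : c2 = t
        · subst hts
          simp [List.foldl_cons, pvStepA, pvMatch, pvGet2_cons, ih _ hrest]
          ring
        · have hts2 : t ≠ c2 := Ne.symm hts
          simp [List.foldl_cons, pvStepA, pvMatch, pvGet2_cons, hts, hts2, ih _ hrest]
    · simp [List.foldl_cons, pvStepA, pvMatch, hok, ih _ hrest]

-- B's loop keeps the first inserted timestamp t first; its stored count grows by one per
-- matching entry, regardless of what the other buckets do.
lemma pvLoopB (l : List (List String)) (t : String) (c : Int) (rest : List (String × Int)) :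
    ∃ rest', (l.foldl pvStepB (PySem.Dict.mk ((t, c) :: rest))).items
      = (t, c + (l.countP (pvMatch t) : Int)) :: rest' := by
  induction l generalizing c rest with
  | nil => exact ⟨rest, by simp⟩
  | cons d l ih =>
    by_cases hok : (PySem.List.pyGet? d 0).getD "" = "OK"
    · set s := (PySem.List.pyGet? d 2).getD "" with hs
      by_cases hts : s = t
      · -- insert at t: head value becomes c + 1, some tail rest'
        have hget : (PySem.Dict.mk ((t, c) :: rest)).getD t 0 = c := by
          simp [PySem.Dict.getD_eq_get?_getD, PySem.Dict.get?_mk_cons]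
        have hcont : (PySem.Dict.mk ((t, c) :: rest)).contains t = true := by
          simp [PySem.Dict.contains_mk]
        have hstep : pvStepB (PySem.Dict.mk ((t, c) :: rest)) d
            = PySem.Dict.mk ((t, c + 1) :: rest.map (fun p => if p.1 == t then (t, c + 1) else p)) := by
          simp only [pvStepB, hok, ← hs, hts, beq_self_eq_true, if_pos, hget]
          apply PySem.Dict.ext
          simp [PySem.Dict.items_insert, hcont]
        rw [List.foldl_cons, hstep]
        obtain ⟨rest', hr⟩ := ih (c + 1) _
        refine ⟨rest', ?_⟩
        rw [hr]
        have : l.countP (pvMatch t) + 1 = (d :: l).countP (pvMatch t) := by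
          simp [pvMatch, hok, ← hs, hts]
        rw [show c + 1 + (l.countP (pvMatch t) : Int)
              = c + ((l.countP (pvMatch t) + 1 : Nat) : Int) by push_cast; ring, this]
      · -- insert at a key s ≠ t: the head pair (t, c) is unchanged either way
        have hts' : (t == s) = false := by
          simp; exact fun h => hts h.symm
        have hitems : ∃ tail, (pvStepB (PySem.Dict.mk ((t, c) :: rest)) d).items
            = (t, c) :: tail := by
          simp only [pvStepB, hok, ← hs, beq_self_eq_true, if_pos]
          rw [PySem.Dict.items_insert]
          by_cases hc : (PySem.Dict.mk ((t, c) :: rest)).contains s = true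
          · rw [if_pos hc]
            rw [List.map_cons, if_neg (by simp [hts'])]
            exact ⟨_, rfl⟩
          · rw [if_neg hc]
            rw [List.cons_append]
            exact ⟨_, rfl⟩
        obtain ⟨tail, htail⟩ := hitems
        have hstep : pvStepB (PySem.Dict.mk ((t, c) :: rest)) d
            = PySem.Dict.mk ((t, c) :: tail) := by
          apply PySem.Dict.ext; simpa [PySem.Dict.items] using htail
        rw [List.foldl_cons, hstep]
        obtain ⟨rest', hr⟩ := ih c tail
        refine ⟨rest', ?_⟩
        rw [hr]
        have : (d :: l).countP (pvMatch t) = l.countP (pvMatch t) := by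
          simp [pvMatch, hok, ← hs, hts]
        rw [this]
    · have hstep : pvStepB (PySem.Dict.mk ((t, c) :: rest)) d
          = PySem.Dict.mk ((t, c) :: rest) := by
        simp [pvStepB, hok]
      rw [List.foldl_cons, hstep]
      obtain ⟨rest', hr⟩ := ih c rest
      refine ⟨rest', ?_⟩
      rw [hr]
      have : (d :: l).countP (pvMatch t) = l.countP (pvMatch t) := by
        simp [pvMatch, hok]
      rw [this]

lemma pvMain (values : List (List String)) (qourum_size : Int)
    (hpre : Pre_is_all_timestamps_the_same values qourum_size) :
    is_all_timestamps_the_same values qourum_size =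
      is_all_timestamps_the_same_alt values qourum_size := by
  obtain ⟨hex, hall⟩ := hpre
  induction values with
  | nil => simp at hex
  | cons d l ih =>
    obtain ⟨hne, hlen⟩ := hall d (by simp)
    have hrest : ∀ d' ∈ l, d' ≠ [] ∧ (d'.headD "" = "OK" → 3 ≤ d'.length) :=
      fun d' hd' => hall d' (by simp [hd'])
    obtain ⟨a, r0, rfl⟩ := List.exists_cons_of_ne_nil hne
    by_cases hok : a = "OK"
    · subst hok
      have h3 : 3 ≤ ("OK" :: r0).length := hlen (by simp)
      match r0, h3 with
      | b :: c2 :: r, _ =>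
        -- A's first step: count = 1, temp_time = c2
        have hstepA : pvStepA ((0 : Int), (none : Option String)) ("OK"::b::c2::r)
            = (1, some c2) := by
          simp [pvStepA, pvGet2_cons]
        -- B's first step: dict becomes {c2: 1}
        have hstepB : pvStepB PySem.Dict.empty ("OK"::b::c2::r)
            = PySem.Dict.mk [(c2, 1)] := by
          apply PySem.Dict.ext
          simp [pvStepB, pvGet2_cons, PySem.Dict.items_insert, PySem.Dict.empty,
            PySem.Dict.contains_mk, PySem.Dict.getD_eq_get?_getD, PySem.Dict.get?]
        simp only [is_all_timestamps_the_same, is_all_timestamps_the_same_alt,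
          List.foldl_cons, hstepA, hstepB,
          pvLoopA_some l 1 c2 hrest]
        obtain ⟨rest', hr⟩ := pvLoopB l c2 1 []
        rw [hr]
        split_ifs with hq
        · symm; simp only [decide_eq_false_iff_not, not_le]; omega
        · symm; simp only [decide_eq_true_eq]; omega
    · -- head is not OK: both sides ignore it
      have hex' : ∃ d' ∈ l, d'.headD "" = "OK" := by
        rcases hex with ⟨d', hd', hOK⟩
        rcases List.mem_cons.mp hd' with h | h
        · exfalso; apply hok; rw [h] at hOK; simpa using hOK
        · exact ⟨d', h, hOK⟩
      have hIH := ih hex' hrest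
      have hstepA : pvStepA ((0 : Int), (none : Option String)) (a :: r0)
          = ((0 : Int), (none : Option String)) := by
        simp [pvStepA, hok]
      have hstepB : pvStepB PySem.Dict.empty (a :: r0) = PySem.Dict.empty := by
        simp [pvStepB, hok]
      simpa only [is_all_timestamps_the_same, is_all_timestamps_the_same_alt,
        List.foldl_cons, hstepA, hstepB] using hIH

-- ===== VERDICT (by name: the statement is the Claim_ definition above) =====
theorem is_all_timestamps_the_same_spec : Claim_equal_is_all_timestamps_the_same := by
  intro values qourum_size _ hpre
  unfold Spec_is_all_timestamps_the_same
  exact (pvMain values qourum_size hpre)
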